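-- pv_equiv track=rewrite | github.com/AdamBeedell/AdventOfCode2024 | 15/15.py | hasspace
-- ===== SOURCE A (Python) =====
-- def hasspace(lst):
--     found_dot = False
--     for i, char in enumerate(lst):
--         if char == "O" and i > 0:  # Skip the first "O" since it's guaranteed
--             if not found_dot:  # If we see an "O" without a preceding "."
--                 return False
--         elif char == ".":  # If we find a ".", mark it as found
--             found_dot = True
--     return True
-- ===== SOURCE B (Python) =====
-- def hasspace(lst):
--     # Find the index of the first "O" at position i > 0; if none, the list is fine.
--     first_o = next((i for i, c in enumerate(lst) if c == "O" and i > 0), None)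
--     return first_o is None or "." in lst[:first_o]
-- ===== Notes on version B (the rewrite author's own statement) =====
-- stated objective: simpler
-- what changed: Replaces A's single stateful early-returning scan (found_dot flag) with find-the-first-offending-'O' followed by a '.'-membership test on the prefix before it.
import Mathlib
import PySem

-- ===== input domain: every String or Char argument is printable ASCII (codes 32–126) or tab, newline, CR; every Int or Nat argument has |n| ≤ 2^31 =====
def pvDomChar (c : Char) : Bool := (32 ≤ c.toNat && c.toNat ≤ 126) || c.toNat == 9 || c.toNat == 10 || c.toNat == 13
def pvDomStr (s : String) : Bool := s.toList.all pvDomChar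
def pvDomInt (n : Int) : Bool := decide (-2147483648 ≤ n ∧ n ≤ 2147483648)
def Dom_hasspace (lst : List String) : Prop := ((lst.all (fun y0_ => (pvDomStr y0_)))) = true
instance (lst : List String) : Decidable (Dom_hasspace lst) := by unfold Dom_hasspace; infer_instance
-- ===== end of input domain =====

-- B replaces A's stateful found_dot scan with find-the-first-offending-'O' then a '.'-membership test on the prefix (objective: simpler; same cost).


-- ===== PORT A =====
-- loop over (i, char) with the found_dot flag, early return via Bool result
def hasspaceLoop : List String → Nat → Bool → Bool
  | [], _, _ => true
  | c :: rest, i, foundDot =>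
    if c = "O" ∧ i > 0 then
      if ¬foundDot then false else hasspaceLoop rest (i + 1) foundDot
    else if c = "." then hasspaceLoop rest (i + 1) true
    else hasspaceLoop rest (i + 1) foundDot

def hasspace (lst : List String) : Bool := hasspaceLoop lst 0 false

-- ===== PORT B =====
-- index of the first "O" at position i > 0 (Python: next((i for i, c in enumerate(lst) if c == "O" and i > 0), None))
def firstO? : List String → Nat → Option Nat
  | [], _ => none
  | c :: rest, i => if c = "O" ∧ i > 0 then some i else firstO? rest (i + 1)

def hasspace_alt (lst : List String) : Bool :=
  match firstO? lst 0 with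
  | none => true
  | some i => (lst.take i).contains "."

-- ===== PRECONDITION & SPEC =====
def Spec_hasspace (lst : List String) (out : Bool) : Prop := out = hasspace_alt lst
instance (lst : List String) (out : Bool) : Decidable (Spec_hasspace lst out) := by unfold Spec_hasspace; infer_instance

-- ===== CLAIM (what is proved, stated in full; the proofs are below) =====
def Claim_equal_hasspace : Prop := ∀ (lst : List String), Dom_hasspace lst → Spec_hasspace lst (hasspace lst)

-- ===== LEMMAS AND PROOFS =====

lemma hasspaceLoop_true : ∀ (lst : List String) (i : Nat), hasspaceLoop lst i true = true := by
  intro lst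
  induction lst with
  | nil => intro i; rfl
  | cons c rest ih =>
    intro i
    simp only [hasspaceLoop]
    split_ifs <;> simp_all

lemma firstO?_ge : ∀ (lst : List String) (i j : Nat), firstO? lst i = some j → i ≤ j := by
  intro lst
  induction lst with
  | nil => intro i j h; exact nomatch h
  | cons c rest ih =>
    intro i j h
    simp only [firstO?] at h
    split_ifs at h with hc
    · simp only [Option.some.injEq] at h; omega
    · have := ih (i + 1) j h; omega

lemma hasspaceLoop_eq_firstO : ∀ (lst : List String) (i : Nat) (fd : Bool), 1 ≤ i →
    hasspaceLoop lst i fd =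
      (match firstO? lst i with
       | none => true
       | some j => fd || (lst.take (j - i)).contains ".") := by
  intro lst
  induction lst with
  | nil => intro i fd _; rfl
  | cons c rest ih =>
    intro i fd hi
    simp only [hasspaceLoop, firstO?]
    by_cases hO : c = "O" ∧ i > 0
    · simp only [if_pos hO]
      cases fd with
      | false => simp
      | true => simp [hasspaceLoop_true]
    · simp only [if_neg hO]
      by_cases hdot : c = "."
      · simp only [if_pos hdot]
        rw [hasspaceLoop_true]
        cases hfo : firstO? rest (i + 1) with
        | none => simp
        | some j =>
          have hj := firstO?_ge rest (i + 1) j hfo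
          have hji : j - i = (j - (i + 1)) + 1 := by omega
          simp [hji, List.take_succ_cons, hdot]
      · simp only [if_neg hdot]
        have hdot' : ¬ ("." = c) := fun h => hdot h.symm
        rw [ih (i + 1) fd (by omega)]
        cases hfo : firstO? rest (i + 1) with
        | none => simp
        | some j =>
          have hj := firstO?_ge rest (i + 1) j hfo
          have hji : j - i = (j - (i + 1)) + 1 := by omega
          simp [hji, List.take_succ_cons, hdot']

-- ===== VERDICT (by name: the statement is the Claim_ definition above) =====
theorem hasspace_spec : Claim_equal_hasspace := by
  intro lst _
  unfold Spec_hasspace hasspace hasspace_alt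
  cases lst with
  | nil => rfl
  | cons c rest =>
    simp only [hasspaceLoop, firstO?]
    have h0 : ¬ (c = "O" ∧ (0:Nat) > 0) := by simp
    simp only [if_neg h0]
    by_cases hdot : c = "."
    · simp only [if_pos hdot]
      rw [hasspaceLoop_eq_firstO rest 1 true (by omega)]
      cases hfo : firstO? rest 1 with
      | none => simp
      | some j =>
        have hj := firstO?_ge rest 1 j hfo
        have hji : j = (j - 1) + 1 := by omega
        rw [hji]
        simp [List.take_succ_cons, hdot]
    · simp only [if_neg hdot]
      have hdot' : ¬ ("." = c) := fun h => hdot h.symm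
      rw [hasspaceLoop_eq_firstO rest 1 false (by omega)]
      cases hfo : firstO? rest 1 with
      | none => simp
      | some j =>
        have hj := firstO?_ge rest 1 j hfo
        have hji : j = (j - 1) + 1 := by omega
        rw [hji]
        simp [List.take_succ_cons, hdot']
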